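-- pv_equiv track=rewrite | github.com/Guivagu-zz/GoogleHashCode | HashCode22/practice_problem/hashCode2022_practice_JJ/process.py | poda_ingredientes_inicial
-- ===== SOURCE A (Python) =====
-- def poda_ingredientes_inicial(clients, ingredient_set):
--     gusta = {}
--     for ingredient in ingredient_set:
--         for client in clients:
--             likes = client[0]
--             dislikes = client[1]
--             if ingredient in likes:
--                 if ingredient in gusta:
--                     gusta[ingredient] = gusta[ingredient] + 1
--                 else:
--                     gusta[ingredient] = 1
--             elif ingredient in dislikes:
--                 if ingredient in gusta:
--                     gusta[ingredient] = gusta[ingredient] - 1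
--                 else:
--                     gusta[ingredient] = -1
--     return [ingredient for ingredient, score in gusta.items() if score >= 0], [ingredient for ingredient, score in gusta.items() if score < 0]
-- ===== SOURCE B (Python) =====
-- def poda_ingredientes_inicial(clients, ingredient_set):
--     # One pass over clients tallying, per ingredient, how many clients like it
--     # and how many dislike it (dislike only counted when not also liked, as a
--     # like takes precedence); then one pass over ingredient_set emitting each
--     # mentioned ingredient once, split by the sign of likes - dislikes.
--     liked = {}
--     disliked = {}
--     for client in clients:
--         ls = set(client[0])
--         for ing in ls:
--             liked[ing] = liked.get(ing, 0) + 1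
--         for ing in set(client[1]):
--             if ing not in ls:
--                 disliked[ing] = disliked.get(ing, 0) + 1
--     keep, drop = [], []
--     seen = set()
--     for ing in ingredient_set:
--         if ing not in seen:
--             seen.add(ing)
--             l = liked.get(ing, 0)
--             d = disliked.get(ing, 0)
--             if l or d:
--                 (keep if l >= d else drop).append(ing)
--     return keep, drop
-- ===== Notes on version B (the rewrite author's own statement) =====
-- stated objective: faster
-- what changed: A rescans all clients' like/dislike lists once per ingredient (nested loops with list membership tests); B makes a single pass over the clients tallying per-ingredient like/dislike counts in two hash maps, then emits each ingredient once, in first-occurrence order of ingredient_set, split by the sign of likes-dislikes.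
import Mathlib
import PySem

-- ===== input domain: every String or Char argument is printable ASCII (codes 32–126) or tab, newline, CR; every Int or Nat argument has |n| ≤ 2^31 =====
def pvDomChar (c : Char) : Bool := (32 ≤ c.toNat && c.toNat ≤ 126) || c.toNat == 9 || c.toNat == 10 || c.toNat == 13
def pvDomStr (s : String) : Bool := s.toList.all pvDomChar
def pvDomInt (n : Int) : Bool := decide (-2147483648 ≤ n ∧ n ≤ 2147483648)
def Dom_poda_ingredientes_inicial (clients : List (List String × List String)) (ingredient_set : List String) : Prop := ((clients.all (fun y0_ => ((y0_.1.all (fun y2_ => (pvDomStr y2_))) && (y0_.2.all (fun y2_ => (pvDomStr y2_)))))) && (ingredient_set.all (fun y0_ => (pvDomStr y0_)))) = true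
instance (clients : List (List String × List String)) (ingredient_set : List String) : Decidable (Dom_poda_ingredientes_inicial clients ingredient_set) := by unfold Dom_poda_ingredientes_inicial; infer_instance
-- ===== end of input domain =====

-- B replaces A's per-ingredient rescan of all client lists by a single tallying pass
-- over the clients plus one pass over ingredient_set (objective: faster, asymptotic).


-- ===== PORT A =====
def poda_ingredientes_inicial (clients : List (List String × List String)) (ingredient_set : List String) : List String × List String :=
  let gusta : PySem.Dict String Int :=
    ingredient_set.foldl (fun gusta ingredient =>
      clients.foldl (fun gusta client =>
        let likes := client.1
        let dislikes := client.2
        if likes.contains ingredient then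
          if gusta.contains ingredient then
            gusta.insert ingredient (gusta.getD ingredient 0 + 1)
          else
            gusta.insert ingredient 1
        else if dislikes.contains ingredient then
          if gusta.contains ingredient then
            gusta.insert ingredient (gusta.getD ingredient 0 - 1)
          else
            gusta.insert ingredient (-1)
        else gusta) gusta) PySem.Dict.empty
  ((gusta.items.filter (fun p => decide (0 ≤ p.2))).map (fun p => p.1),
   (gusta.items.filter (fun p => decide (p.2 < 0))).map (fun p => p.1))

-- ===== PORT B =====
def poda_ingredientes_inicial_alt (clients : List (List String × List String)) (ingredient_set : List String) : List String × List String :=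
  let tallies : PySem.Dict String Int × PySem.Dict String Int :=
    clients.foldl (fun t client =>
      ((PySem.Set.ofList client.1).foldl (fun d ing => d.insert ing (d.getD ing 0 + 1)) t.1,
       (PySem.Set.ofList client.2).foldl
        (fun d ing => if !((PySem.Set.ofList client.1).contains ing)
          then d.insert ing (d.getD ing 0 + 1) else d) t.2)) (PySem.Dict.empty, PySem.Dict.empty)
  let liked := tallies.1
  let disliked := tallies.2
  let fin : PySem.Set String × List String × List String :=
    ingredient_set.foldl (fun st ing =>
      if st.1.contains ing then st
      else
        if liked.getD ing 0 ≠ 0 ∨ disliked.getD ing 0 ≠ 0 then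
          if disliked.getD ing 0 ≤ liked.getD ing 0 then
            (PySem.Set.add st.1 ing, st.2.1 ++ [ing], st.2.2)
          else (PySem.Set.add st.1 ing, st.2.1, st.2.2 ++ [ing])
        else (PySem.Set.add st.1 ing, st.2.1, st.2.2)) (PySem.Set.empty, [], [])
  (fin.2.1, fin.2.2)

-- ===== PRECONDITION & SPEC =====
def Spec_poda_ingredientes_inicial (clients : List (List String × List String)) (ingredient_set : List String) (out : List String × List String) : Prop := out = poda_ingredientes_inicial_alt clients ingredient_set
instance (clients : List (List String × List String)) (ingredient_set : List String) (out : List String × List String) : Decidable (Spec_poda_ingredientes_inicial clients ingredient_set out) := by unfold Spec_poda_ingredientes_inicial; infer_instance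

-- ===== CLAIM (what is proved, stated in full; the proofs are below) =====
def Claim_equal_poda_ingredientes_inicial : Prop := ∀ (clients : List (List String × List String)) (ingredient_set : List String), Dom_poda_ingredientes_inicial clients ingredient_set → Spec_poda_ingredientes_inicial clients ingredient_set (poda_ingredientes_inicial clients ingredient_set)

-- ===== LEMMAS AND PROOFS =====

-- does some client mention ingredient i (like or dislike)?
def pvMentions (clients : List (List String × List String)) (i : String) : Bool :=
  clients.any (fun c => c.1.contains i || c.2.contains i)

-- number of clients liking i
def pvL (clients : List (List String × List String)) (i : String) : Nat :=
  clients.countP (fun c => c.1.contains i)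

-- number of clients disliking i (and not liking it: a like takes precedence in A)
def pvD (clients : List (List String × List String)) (i : String) : Nat :=
  clients.countP (fun c => !c.1.contains i && c.2.contains i)

-- net score of ingredient i
def pvSC (clients : List (List String × List String)) (i : String) : Int :=
  (pvL clients i : Int) - (pvD clients i : Int)

-- the mentioned ingredients of ings not in ks, first occurrences in order, with the sign of their score
def pvFresh (clients : List (List String × List String)) (ks : List String) : List String → List (String × Bool)
  | [] => []
  | i :: is =>
    if pvMentions clients i && !(ks.contains i) then
      (i, decide (0 ≤ pvSC clients i)) :: pvFresh clients (i :: ks) is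
    else
      pvFresh clients ks is

theorem pvSC_zero_of_not_mentions (clients : List (List String × List String)) (i : String)
    (h : pvMentions clients i = false) : pvSC clients i = 0 := by
  unfold pvMentions at h
  rw [List.any_eq_false] at h
  unfold pvSC pvL pvD
  have h1 : clients.countP (fun c => c.1.contains i) = 0 := by
    rw [List.countP_eq_zero]
    intro c hc
    have := h c hc
    simp only [Bool.or_eq_true, not_or] at this
    simpa using this.1
  have h2 : clients.countP (fun c => !c.1.contains i && c.2.contains i) = 0 := by
    rw [List.countP_eq_zero]
    intro c hc
    have := h c hc
    simp only [Bool.or_eq_true, not_or] at this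
    intro hcon
    rw [Bool.and_eq_true] at hcon
    exact this.2 hcon.2
  rw [h1, h2]
  simp

theorem pvFresh_congr (clients : List (List String × List String)) (ings : List String)
    (ks ks' : List String)
    (h : ∀ x, pvMentions clients x = true → ks.contains x = ks'.contains x) :
    pvFresh clients ks ings = pvFresh clients ks' ings := by
  induction ings generalizing ks ks' with
  | nil => rfl
  | cons i is ih =>
    have h' : ∀ x, pvMentions clients x = true → (i :: ks).contains x = (i :: ks').contains x := by
      intro x hx
      rw [List.contains_cons, List.contains_cons, h x hx]
    by_cases hmi : pvMentions clients i = true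
    · simp only [pvFresh, h i hmi]
      split
      · rw [ih _ _ h']
      · rw [ih _ _ h]
    · have hmi' : pvMentions clients i = false := by simpa using hmi
      simp only [pvFresh, hmi', Bool.false_and, Bool.false_eq_true, if_false]
      exact ih _ _ h

theorem pvMentions_cons (c : List String × List String)
    (cs : List (List String × List String)) (i : String) :
    pvMentions (c :: cs) i = ((c.1.contains i || c.2.contains i) || pvMentions cs i) := by
  simp [pvMentions, List.any_cons]

theorem pvSC_cons (c : List String × List String)
    (cs : List (List String × List String)) (i : String) :
    pvSC (c :: cs) i
      = (if c.1.contains i then 1 else if c.2.contains i then (-1 : Int) else 0) + pvSC cs i := by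
  unfold pvSC pvL pvD
  rw [List.countP_cons, List.countP_cons]
  cases hl : c.1.contains i <;> cases hd : c.2.contains i <;>
    simp [hl, hd] <;> omega

theorem innerA_cont (g : PySem.Dict String Int) (i : String) (v : Int)
    (cs : List (List String × List String)) :
    (if pvMentions cs i then (g.insert i v).insert i ((g.insert i v).getD i 0 + pvSC cs i)
     else g.insert i v) = g.insert i (v + pvSC cs i) := by
  cases hm : pvMentions cs i
  · rw [if_neg (by simp), pvSC_zero_of_not_mentions cs i hm, add_zero]
  · rw [if_pos rfl, PySem.Dict.getD_insert_self, PySem.Dict.insert_insert_self]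

theorem innerA (clients : List (List String × List String)) (i : String)
    (g : PySem.Dict String Int) :
    clients.foldl (fun g c =>
      if c.1.contains i then
        if g.contains i then g.insert i (g.getD i 0 + 1) else g.insert i 1
      else if c.2.contains i then
        if g.contains i then g.insert i (g.getD i 0 - 1) else g.insert i (-1)
      else g) g
    = if pvMentions clients i then g.insert i (g.getD i 0 + pvSC clients i) else g := by
  induction clients generalizing g with
  | nil => simp [pvMentions]
  | cons c cs ih =>
    rw [List.foldl_cons, pvMentions_cons]
    by_cases hl : c.1.contains i = true
    · have hm : (c.1.contains i || c.2.contains i || pvMentions cs i) = true := by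
        rw [Bool.or_eq_true, Bool.or_eq_true]
        exact Or.inl (Or.inl hl)
      have hsc : pvSC (c :: cs) i = 1 + pvSC cs i := by rw [pvSC_cons, if_pos hl]
      rw [if_pos hm, hsc, if_pos hl]
      by_cases hg : g.contains i = true
      · rw [if_pos hg, ih, innerA_cont, add_assoc]
      · have hg' : g.contains i = false := by simpa using hg
        rw [if_neg hg, ih, innerA_cont, PySem.Dict.getD_of_not_contains g 0 hg', zero_add]
    · by_cases hd : c.2.contains i = true
      · have hm : (c.1.contains i || c.2.contains i || pvMentions cs i) = true := by
          rw [Bool.or_eq_true, Bool.or_eq_true]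
          exact Or.inl (Or.inr hd)
        have hsc : pvSC (c :: cs) i = -1 + pvSC cs i := by rw [pvSC_cons, if_neg hl, if_pos hd]
        rw [if_pos hm, hsc, if_neg hl, if_pos hd]
        by_cases hg : g.contains i = true
        · rw [if_pos hg, ih, innerA_cont g i (g.getD i 0 - 1) cs]
          congr 1
          ring
        · have hg' : g.contains i = false := by simpa using hg
          rw [if_neg hg, ih, innerA_cont g i (-1) cs, PySem.Dict.getD_of_not_contains g 0 hg']
          congr 1
          ring
      · have hsc : pvSC (c :: cs) i = pvSC cs i := by
          rw [pvSC_cons, if_neg hl, if_neg hd]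
          ring
        rw [hsc, if_neg hl, if_neg hd, ih]
        simp only [Bool.eq_false_iff.mpr hl, Bool.eq_false_iff.mpr hd, Bool.false_or]

theorem outerA (clients : List (List String × List String)) (ings : List String)
    (g : PySem.Dict String Int) (hnd : g.keys.Nodup)
    (hinv : ∀ p ∈ g.items, pvMentions clients p.1 = true ∧
      decide (0 ≤ p.2) = decide (0 ≤ pvSC clients p.1)) :
    (ings.foldl (fun g i =>
        if pvMentions clients i then g.insert i (g.getD i 0 + pvSC clients i) else g) g).items.map
      (fun p => (p.1, decide (0 ≤ p.2)))
    = g.items.map (fun p => (p.1, decide (0 ≤ p.2))) ++ pvFresh clients g.keys ings := by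
  induction ings generalizing g with
  | nil => simp [pvFresh]
  | cons i is ih =>
    rw [List.foldl_cons]
    by_cases hmi : pvMentions clients i = true
    · by_cases hc : g.contains i = true
      · rw [if_pos hmi]
        have hkeys := PySem.Dict.keys_insert_of_contains g (g.getD i 0 + pvSC clients i) hc
        have hitems := PySem.Dict.items_insert_of_contains g (g.getD i 0 + pvSC clients i) hc
        have hsign_pres : ∀ q ∈ g.items, q.1 = i →
            decide (0 ≤ g.getD i 0 + pvSC clients i) = decide (0 ≤ q.2) := by
          intro q hq hqi
          have hqe2 : (i, q.2) ∈ g.items := by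
            have hq' : q = (i, q.2) := by
              cases q
              simp only at hqi
              rw [hqi]
            rw [← hq']
            exact hq
          have hv : g.getD i 0 = q.2 := PySem.Dict.getD_of_mem_items g hqe2 hnd 0
          have hsign := (hinv q hq).2
          rw [hqi] at hsign
          have hiff : (0 ≤ q.2) ↔ (0 ≤ pvSC clients i) := by
            simpa [decide_eq_decide] using hsign
          rw [hv, decide_eq_decide]
          by_cases hsc : 0 ≤ pvSC clients i
          · have h2 := hiff.mpr hsc
            constructor <;> intro <;> omega
          · have h2 : ¬ (0 ≤ q.2) := fun h => hsc (hiff.mp h)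
            simp only [not_le] at hsc h2
            constructor <;> intro <;> omega
        have hsignmap :
            (g.insert i (g.getD i 0 + pvSC clients i)).items.map (fun p => (p.1, decide (0 ≤ p.2)))
              = g.items.map (fun p => (p.1, decide (0 ≤ p.2))) := by
          rw [hitems, List.map_map]
          apply List.map_eq_map_iff.mpr
          intro p hp
          simp only [Function.comp]
          by_cases hpi : p.1 = i
          · have hb : (p.1 == i) = true := by simpa using hpi
            have hval := hsign_pres p hp hpi
            simp [hpi, hval]
          · have hb : (p.1 == i) = false := by simpa using hpi
            simp [hb]
        have hnd' : (g.insert i (g.getD i 0 + pvSC clients i)).keys.Nodup := by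
          rw [hkeys]
          exact hnd
        have hinv' : ∀ p ∈ (g.insert i (g.getD i 0 + pvSC clients i)).items,
            pvMentions clients p.1 = true ∧ decide (0 ≤ p.2) = decide (0 ≤ pvSC clients p.1) := by
          intro p hp
          rw [hitems] at hp
          obtain ⟨q, hq, hqe⟩ := List.mem_map.mp hp
          by_cases hqi : q.1 = i
          · rw [if_pos (by simpa using hqi)] at hqe
            rw [← hqe]
            refine ⟨hmi, ?_⟩
            have hsign := (hinv q hq).2
            rw [hqi] at hsign
            rw [hsign_pres q hq hqi, hsign]
          · rw [if_neg (by simpa using hqi)] at hqe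
            rw [← hqe]
            exact hinv q hq
        have hkm : i ∈ g.keys := (PySem.Dict.contains_iff_mem_keys g i).mp hc
        have hfresh : pvFresh clients g.keys (i :: is) = pvFresh clients g.keys is := by
          simp [pvFresh, hkm]
        rw [ih _ hnd' hinv', hsignmap, hkeys, hfresh]
      · rw [if_pos hmi]
        have hc' : g.contains i = false := by simpa using hc
        have hv0 : g.getD i 0 = 0 := PySem.Dict.getD_of_not_contains g 0 hc'
        have hkeys := PySem.Dict.keys_insert_of_not_contains g (g.getD i 0 + pvSC clients i) hc'
        have hitems := PySem.Dict.items_insert_of_not_contains g (g.getD i 0 + pvSC clients i) hc'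
        have hki : i ∉ g.keys := fun hm =>
          hc ((PySem.Dict.contains_iff_mem_keys g i).mpr hm)
        have hnd' : (g.insert i (g.getD i 0 + pvSC clients i)).keys.Nodup := by
          rw [hkeys, List.nodup_append]
          exact ⟨hnd, List.nodup_singleton i, by simpa using fun x hx (he : x = i) => hki (he ▸ hx)⟩
        have hinv' : ∀ p ∈ (g.insert i (g.getD i 0 + pvSC clients i)).items,
            pvMentions clients p.1 = true ∧ decide (0 ≤ p.2) = decide (0 ≤ pvSC clients p.1) := by
          intro p hp
          rw [hitems] at hp
          rcases List.mem_append.mp hp with h | h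
          · exact hinv p h
          · have hp' : p = (i, g.getD i 0 + pvSC clients i) := by simpa using h
            rw [hp']
            exact ⟨hmi, by rw [hv0, zero_add]⟩
        have hfresh : pvFresh clients g.keys (i :: is)
            = (i, decide (0 ≤ pvSC clients i)) :: pvFresh clients (i :: g.keys) is := by
          simp [pvFresh, hmi, hki]
        rw [ih _ hnd' hinv', hitems, hkeys, hfresh, List.map_append,
          pvFresh_congr clients is (g.keys ++ [i]) (i :: g.keys)
            (fun x _ => by simp [Bool.or_comm]),
          hv0, zero_add]
        simp
    · have hmi' : pvMentions clients i = false := by simpa using hmi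
      rw [if_neg hmi]
      have hfresh : pvFresh clients g.keys (i :: is) = pvFresh clients g.keys is := by
        simp [pvFresh, hmi']
      rw [hfresh]
      exact ih g hnd hinv

theorem proj_pos (l : List (String × Int)) :
    ((l.map (fun p => (p.1, decide (0 ≤ p.2)))).filter (fun q => q.2)).map (fun q => q.1)
      = (l.filter (fun p => decide (0 ≤ p.2))).map (fun p => p.1) := by
  induction l with
  | nil => rfl
  | cons a l ih =>
    by_cases h0 : 0 ≤ a.2
    · simp [h0, ih]
    · simp [h0, ih]

theorem proj_neg (l : List (String × Int)) :
    ((l.map (fun p => (p.1, decide (0 ≤ p.2)))).filter (fun q => !q.2)).map (fun q => q.1)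
      = (l.filter (fun p => decide (p.2 < 0))).map (fun p => p.1) := by
  induction l with
  | nil => rfl
  | cons a l ih =>
    by_cases h0 : 0 ≤ a.2
    · simp [h0, Int.not_lt.mpr h0, ih]
    · simp [h0, Int.not_le.mp h0, ih]

theorem A_char (clients : List (List String × List String)) (ings : List String) :
    poda_ingredientes_inicial clients ings
    = (((pvFresh clients [] ings).filter (fun q => q.2)).map (fun q => q.1),
       ((pvFresh clients [] ings).filter (fun q => !q.2)).map (fun q => q.1)) := by
  simp only [poda_ingredientes_inicial]
  have key : (fun (gusta : PySem.Dict String Int) (ingredient : String) =>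
        clients.foldl (fun gusta client =>
          if client.1.contains ingredient then
            if gusta.contains ingredient then
              gusta.insert ingredient (gusta.getD ingredient 0 + 1)
            else
              gusta.insert ingredient 1
          else if client.2.contains ingredient then
            if gusta.contains ingredient then
              gusta.insert ingredient (gusta.getD ingredient 0 - 1)
            else
              gusta.insert ingredient (-1)
          else gusta) gusta)
      = (fun (g : PySem.Dict String Int) (i : String) =>
          if pvMentions clients i then g.insert i (g.getD i 0 + pvSC clients i) else g) := by
    funext g i
    exact innerA clients i g
  rw [key]
  have hout := outerA clients ings PySem.Dict.empty
    (by rw [show (PySem.Dict.empty : PySem.Dict String Int).keys = [] from rfl]; exact List.nodup_nil)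
    (by intro p hp
        rw [show (PySem.Dict.empty : PySem.Dict String Int).items = [] from rfl] at hp
        cases hp)
  rw [show (PySem.Dict.empty : PySem.Dict String Int).items = [] from rfl,
    show (PySem.Dict.empty : PySem.Dict String Int).keys = [] from rfl,
    List.map_nil, List.nil_append] at hout
  rw [← proj_pos, ← proj_neg, hout]

theorem tallies_getD (clients : List (List String × List String))
    (d1 d2 : PySem.Dict String Int) (i : String) :
    (clients.foldl (fun t client =>
      ((PySem.Set.ofList client.1).foldl (fun d ing => d.insert ing (d.getD ing 0 + 1)) t.1,
       (PySem.Set.ofList client.2).foldl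
        (fun d ing => if !((PySem.Set.ofList client.1).contains ing)
          then d.insert ing (d.getD ing 0 + 1) else d) t.2)) (d1, d2)).1.getD i 0
      = d1.getD i 0 + (pvL clients i : Int)
    ∧ (clients.foldl (fun t client =>
      ((PySem.Set.ofList client.1).foldl (fun d ing => d.insert ing (d.getD ing 0 + 1)) t.1,
       (PySem.Set.ofList client.2).foldl
        (fun d ing => if !((PySem.Set.ofList client.1).contains ing)
          then d.insert ing (d.getD ing 0 + 1) else d) t.2)) (d1, d2)).2.getD i 0
      = d2.getD i 0 + (pvD clients i : Int) := by
  induction clients generalizing d1 d2 with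
  | nil => simp [pvL, pvD]
  | cons c cs ih =>
    simp only [List.foldl_cons]
    obtain ⟨ih1, ih2⟩ := ih
      ((PySem.Set.ofList c.1).foldl (fun d ing => d.insert ing (d.getD ing 0 + 1)) d1)
      ((PySem.Set.ofList c.2).foldl
        (fun d ing => if !(PySem.Set.contains (PySem.Set.ofList c.1) ing)
          then d.insert ing (d.getD ing 0 + 1) else d) d2)
    constructor
    · rw [ih1, PySem.Dict.getD_foldl_insert_add_one]
      have hcnt : (((PySem.Set.ofList c.1).count i : Int)) = if c.1.contains i then 1 else 0 := by
        by_cases h : i ∈ c.1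
        · rw [List.count_eq_one_of_mem (PySem.Set.nodup_ofList c.1)
            ((PySem.Set.mem_ofList c.1 i).mpr h), if_pos (by simpa using h)]
          norm_num
        · rw [List.count_eq_zero.mpr (fun hm => h ((PySem.Set.mem_ofList c.1 i).mp hm)),
            if_neg (by simpa using h)]
          norm_num
      rw [hcnt]
      unfold pvL
      rw [List.countP_cons]
      push_cast
      split_ifs <;> omega
    · rw [ih2, PySem.List.foldl_if_eq_foldl_filter, PySem.Dict.getD_foldl_insert_add_one]
      have hcnt : ((((PySem.Set.ofList c.2).filter
            (fun ing => !(PySem.Set.contains (PySem.Set.ofList c.1) ing))).count i : Int))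
          = if !c.1.contains i && c.2.contains i then 1 else 0 := by
        by_cases h2 : i ∈ c.2
        · by_cases h1 : i ∈ c.1
          · rw [List.count_eq_zero.mpr, if_neg (by simp [h1])]
            · norm_num
            · intro hm
              rw [List.mem_filter] at hm
              have := hm.2
              simp [pysem, h1] at this
          · rw [List.count_filter (by simp [pysem, h1]),
              List.count_eq_one_of_mem (PySem.Set.nodup_ofList c.2)
                ((PySem.Set.mem_ofList c.2 i).mpr h2),
              if_pos (by simp [h1, h2])]
            norm_num
        · rw [List.count_eq_zero.mpr
            (fun hm => h2 ((PySem.Set.mem_ofList c.2 i).mp (List.mem_of_mem_filter hm))),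
            if_neg (by simp [h2])]
          norm_num
      rw [hcnt]
      unfold pvD
      rw [List.countP_cons]
      push_cast
      split_ifs <;> omega

theorem pvMentions_iff (clients : List (List String × List String)) (i : String) :
    pvMentions clients i = true ↔ (pvL clients i ≠ 0 ∨ pvD clients i ≠ 0) := by
  unfold pvMentions pvL pvD
  rw [List.any_eq_true]
  constructor
  · rintro ⟨c, hc, hor⟩
    rw [Bool.or_eq_true] at hor
    rcases hor with hl | hd
    · exact Or.inl (by
        have : 0 < clients.countP (fun c => c.1.contains i) :=
          List.countP_pos_iff.mpr ⟨c, hc, hl⟩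
        omega)
    · by_cases hl : c.1.contains i = true
      · exact Or.inl (by
          have : 0 < clients.countP (fun c => c.1.contains i) :=
            List.countP_pos_iff.mpr ⟨c, hc, hl⟩
          omega)
      · exact Or.inr (by
          have : 0 < clients.countP (fun c => !c.1.contains i && c.2.contains i) :=
            List.countP_pos_iff.mpr ⟨c, hc, by
              simp only [Bool.and_eq_true, Bool.not_eq_true']
              exact ⟨Bool.eq_false_iff.mpr hl, hd⟩⟩
          omega)
  · rintro (hL | hD)
    · have : 0 < clients.countP (fun c => c.1.contains i) := Nat.pos_of_ne_zero hL
      obtain ⟨c, hc, hp⟩ := List.countP_pos_iff.mp this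
      exact ⟨c, hc, by simp only [Bool.or_eq_true]; exact Or.inl hp⟩
    · have : 0 < clients.countP (fun c => !c.1.contains i && c.2.contains i) := Nat.pos_of_ne_zero hD
      obtain ⟨c, hc, hp⟩ := List.countP_pos_iff.mp this
      rw [Bool.and_eq_true] at hp
      exact ⟨c, hc, by simp only [Bool.or_eq_true]; exact Or.inr hp.2⟩

theorem finB (clients : List (List String × List String))
    (liked disliked : PySem.Dict String Int)
    (hl : ∀ i, liked.getD i 0 = (pvL clients i : Int))
    (hd : ∀ i, disliked.getD i 0 = (pvD clients i : Int))
    (ings : List String) (s : List String) (k0 d0 : List String) :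
    (ings.foldl (fun (st : PySem.Set String × List String × List String) ing =>
      if st.1.contains ing then st
      else
        if liked.getD ing 0 ≠ 0 ∨ disliked.getD ing 0 ≠ 0 then
          if disliked.getD ing 0 ≤ liked.getD ing 0 then
            (PySem.Set.add st.1 ing, st.2.1 ++ [ing], st.2.2)
          else (PySem.Set.add st.1 ing, st.2.1, st.2.2 ++ [ing])
        else (PySem.Set.add st.1 ing, st.2.1, st.2.2)) (s, k0, d0)).2
    = (k0 ++ ((pvFresh clients s ings).filter (fun q => q.2)).map (fun q => q.1),
       d0 ++ ((pvFresh clients s ings).filter (fun q => !q.2)).map (fun q => q.1)) := by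
  induction ings generalizing s k0 d0 with
  | nil => simp [pvFresh]
  | cons i is ih =>
    simp only [List.foldl_cons]
    by_cases hm : i ∈ s
    · have hsc : PySem.Set.contains s i = true := by simp [pysem, hm]
      rw [if_pos hsc, ih s k0 d0]
      have hfr : pvFresh clients s (i :: is) = pvFresh clients s is := by
        simp [pvFresh, hm]
      rw [hfr]
    · have hsc : PySem.Set.contains s i = false := by simp [pysem, hm]
      rw [if_neg (by rw [hsc]; exact Bool.false_ne_true)]
      by_cases hmi : pvMentions clients i = true
      · have hcond : (liked.getD i 0 ≠ 0 ∨ disliked.getD i 0 ≠ 0) := by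
          rw [hl i, hd i]
          rcases (pvMentions_iff clients i).mp hmi with h | h
          · exact Or.inl (Int.natCast_ne_zero.mpr h)
          · exact Or.inr (Int.natCast_ne_zero.mpr h)
        rw [if_pos hcond]
        have hcongr := pvFresh_congr clients is (PySem.Set.add s i) (i :: s)
          (fun x _ => by simp [pysem, Bool.or_comm])
        by_cases hk : (0 ≤ pvSC clients i)
        · have hle : disliked.getD i 0 ≤ liked.getD i 0 := by
            rw [hl i, hd i]
            unfold pvSC at hk
            omega
          rw [if_pos hle, ih (PySem.Set.add s i) (k0 ++ [i]) d0]
          have hfr : pvFresh clients s (i :: is)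
              = (i, true) :: pvFresh clients (i :: s) is := by
            simp [pvFresh, hmi, hm, hk]
          rw [hfr, hcongr]
          simp
        · have hlt : ¬ (disliked.getD i 0 ≤ liked.getD i 0) := by
            rw [hl i, hd i]
            unfold pvSC at hk
            omega
          rw [if_neg hlt, ih (PySem.Set.add s i) k0 (d0 ++ [i])]
          have hfr : pvFresh clients s (i :: is)
              = (i, false) :: pvFresh clients (i :: s) is := by
            simp [pvFresh, hmi, hm, hk]
          rw [hfr, hcongr]
          simp
      · have hmi' : pvMentions clients i = false := by simpa using hmi
        have h0 := not_or.mp (mt (pvMentions_iff clients i).mpr (by simp [hmi']))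
        have hcond : ¬ (liked.getD i 0 ≠ 0 ∨ disliked.getD i 0 ≠ 0) := by
          rw [hl i, hd i]
          simp only [not_or, not_not]
          constructor
          · exact_mod_cast congrArg (Nat.cast : Nat → Int) (not_not.mp h0.1)
          · exact_mod_cast congrArg (Nat.cast : Nat → Int) (not_not.mp h0.2)
        rw [if_neg hcond, ih (PySem.Set.add s i) k0 d0]
        have hcongr := pvFresh_congr clients is (PySem.Set.add s i) s
          (fun x hx => by
            have hxi : x ≠ i := by
              rintro rfl
              rw [hmi'] at hx
              cases hx
            simp [pysem, hxi])
        have hfr : pvFresh clients s (i :: is) = pvFresh clients s is := by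
          simp [pvFresh, hmi']
        rw [hfr, hcongr]

theorem B_char (clients : List (List String × List String)) (ings : List String) :
    poda_ingredientes_inicial_alt clients ings
    = (((pvFresh clients [] ings).filter (fun q => q.2)).map (fun q => q.1),
       ((pvFresh clients [] ings).filter (fun q => !q.2)).map (fun q => q.1)) := by
  simp only [poda_ingredientes_inicial_alt]
  have hl : ∀ i, (clients.foldl (fun t client =>
      ((PySem.Set.ofList client.1).foldl (fun d ing => d.insert ing (d.getD ing 0 + 1)) t.1,
       (PySem.Set.ofList client.2).foldl
        (fun d ing => if !((PySem.Set.ofList client.1).contains ing)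
          then d.insert ing (d.getD ing 0 + 1) else d) t.2))
      ((PySem.Dict.empty : PySem.Dict String Int), (PySem.Dict.empty : PySem.Dict String Int))).1.getD i 0
      = (pvL clients i : Int) := by
    intro i
    rw [(tallies_getD clients PySem.Dict.empty PySem.Dict.empty i).1,
      show (PySem.Dict.empty : PySem.Dict String Int).getD i 0 = 0 from rfl, zero_add]
  have hd : ∀ i, (clients.foldl (fun t client =>
      ((PySem.Set.ofList client.1).foldl (fun d ing => d.insert ing (d.getD ing 0 + 1)) t.1,
       (PySem.Set.ofList client.2).foldl
        (fun d ing => if !((PySem.Set.ofList client.1).contains ing)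
          then d.insert ing (d.getD ing 0 + 1) else d) t.2))
      ((PySem.Dict.empty : PySem.Dict String Int), (PySem.Dict.empty : PySem.Dict String Int))).2.getD i 0
      = (pvD clients i : Int) := by
    intro i
    rw [(tallies_getD clients PySem.Dict.empty PySem.Dict.empty i).2,
      show (PySem.Dict.empty : PySem.Dict String Int).getD i 0 = 0 from rfl, zero_add]
  rw [finB clients _ _ hl hd ings PySem.Set.empty [] []]
  simp

-- ===== VERDICT (by name: the statement is the Claim_ definition above) =====
theorem poda_ingredientes_inicial_spec : Claim_equal_poda_ingredientes_inicial := by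
  intro clients ings _
  unfold Spec_poda_ingredientes_inicial
  rw [A_char, B_char]
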